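-- pv_equiv track=rewrite | github.com/phuayj/delta-lfit-2 | delta_lfit_2/logic.py | get_real_pos_idx
-- ===== SOURCE A (Python) =====
-- def get_pos_idx(curr_var, num_vars, i, rule_len, last_var):
--     assert i < rule_len
--     if i == 0 and curr_var == -1:
--         return 0
--     if i == rule_len - 1:
--         return num_vars - last_var - 1
--     result = 0
--     for j in range(max(last_var + 1, i), curr_var + 1):
--         result += get_pos_idx(num_vars - (rule_len - 1 - i), num_vars, i + 1, rule_len, j)
--     return result
--
-- def get_real_pos_idx(rule_body, num_vars):
--     pos_idx = 0
--     last_var = -1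
--     for i in range(len(rule_body) - 1):
--         if rule_body[i][1][0] > i and rule_body[i][1][0] > last_var + 1:
--             pos_idx += get_pos_idx(rule_body[i][1][0] - 1, num_vars, i,
--                                    len(rule_body), last_var)
--         last_var = rule_body[i][1][0]
--     pos_idx += (rule_body[-1][1][0] - last_var - 1)
--     return pos_idx
-- ===== SOURCE B (Python) =====
-- def _comb(n, k):
--     # binomial coefficient C(n, k), 0 when n < 0 or k out of range
--     if n < 0 or k < 0 or k > n:
--         return 0
--     r = 1
--     for t in range(k):
--         r = r * (n - t) // (t + 1)
--     return r
--
--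
-- def get_real_pos_idx(rule_body, num_vars):
--     L = len(rule_body)
--     pos_idx = 0
--     last_var = -1
--     for i in range(L - 1):
--         v = rule_body[i][1][0]
--         if v > i and v > last_var + 1:
--             lb = max(last_var + 1, i)
--             r = L - 1 - i
--             if r == 1:
--                 # arithmetic series: sum_{j=lb}^{v-1} (num_vars - 1 - j)
--                 pos_idx += (v - lb) * ((num_vars - 1 - lb) + (num_vars - v)) // 2
--             else:
--                 # hockey-stick: sum_{j=lb}^{v-1} C(num_vars-1-j, r) telescopes
--                 pos_idx += _comb(num_vars - lb, r + 1) - _comb(num_vars - v, r + 1)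
--         last_var = v
--     pos_idx += rule_body[-1][1][0] - last_var - 1
--     return pos_idx
-- ===== Notes on version B (the rewrite author's own statement) =====
-- stated objective: faster
-- what changed: B replaces A's exponential recursive enumeration (get_pos_idx re-counts every completion of the rule body) by a closed-form contribution per loop step: a hockey-stick telescoped binomial coefficient C(num_vars-lb,r+1)-C(num_vars-v,r+1), and an exact arithmetic-series formula for the last-but-one position.
import Mathlib
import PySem

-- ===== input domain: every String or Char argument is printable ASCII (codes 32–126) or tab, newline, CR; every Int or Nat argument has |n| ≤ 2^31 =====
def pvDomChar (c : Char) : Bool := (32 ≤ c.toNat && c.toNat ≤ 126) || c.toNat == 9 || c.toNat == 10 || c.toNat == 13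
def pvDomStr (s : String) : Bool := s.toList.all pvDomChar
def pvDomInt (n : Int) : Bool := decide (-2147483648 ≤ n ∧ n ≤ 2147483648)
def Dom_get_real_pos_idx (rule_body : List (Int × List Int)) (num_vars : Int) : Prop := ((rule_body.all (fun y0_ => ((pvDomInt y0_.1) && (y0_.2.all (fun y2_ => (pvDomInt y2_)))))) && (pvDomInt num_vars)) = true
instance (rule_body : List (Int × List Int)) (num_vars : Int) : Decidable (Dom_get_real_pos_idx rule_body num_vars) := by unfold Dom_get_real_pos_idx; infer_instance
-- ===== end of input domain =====

-- B replaces A's exponential recursive enumeration by a closed-form binomial/arithmetic-series formula per loop step (objective: faster).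

-- ===== PORT A =====
-- helper of A: naive recursive enumeration count
def get_pos_idx (curr_var num_vars i rule_len last_var : Int) : Int :=
  if rule_len ≤ i then 0   -- Python's `assert i < rule_len` raises here (unreachable from get_real_pos_idx); 0 arbitrary
  else if i = 0 ∧ curr_var = -1 then 0
  else if i = rule_len - 1 then num_vars - last_var - 1
  else
    (PySem.List.pyRange (max (last_var + 1) i) (curr_var + 1) 1).foldl
      (fun result j => result + get_pos_idx (num_vars - (rule_len - 1 - i)) num_vars (i + 1) rule_len j) 0
termination_by (rule_len - i).toNat
decreasing_by omega

def get_real_pos_idx (rule_body : List (Int × List Int)) (num_vars : Int) : Int :=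
  let st := (PySem.List.pyRange 0 ((rule_body.length : Int) - 1) 1).foldl
    (fun (st : Int × Int) i =>
      let v := PySem.List.pyGetD (PySem.List.pyGetD rule_body i (0, [])).2 0 0
      ((if v > i ∧ v > st.2 + 1 then
          st.1 + get_pos_idx (v - 1) num_vars i (rule_body.length : Int) st.2
        else st.1), v))
    (0, -1)
  st.1 + (PySem.List.pyGetD (PySem.List.pyGetD rule_body (-1) (0, [])).2 0 0 - st.2 - 1)

-- ===== PORT B =====
-- helper of B: binomial coefficient C(n, k) (0 when n < 0 or k outside [0, n]), by the running-product loop of Source B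
def pvComb (n k : Int) : Int :=
  if n < 0 ∨ k < 0 ∨ k > n then 0
  else (PySem.List.pyRange 0 k 1).foldl (fun r t => PySem.Int.floordiv (r * (n - t)) (t + 1)) 1

def get_real_pos_idx_alt (rule_body : List (Int × List Int)) (num_vars : Int) : Int :=
  let L : Int := rule_body.length
  let st := (PySem.List.pyRange 0 (L - 1) 1).foldl
    (fun (st : Int × Int) i =>
      let v := PySem.List.pyGetD (PySem.List.pyGetD rule_body i (0, [])).2 0 0
      ((if v > i ∧ v > st.2 + 1 then
          let lb := max (st.2 + 1) i
          let r := L - 1 - i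
          if r = 1 then
            st.1 + PySem.Int.floordiv ((v - lb) * ((num_vars - 1 - lb) + (num_vars - v))) 2
          else
            st.1 + (pvComb (num_vars - lb) (r + 1) - pvComb (num_vars - v) (r + 1))
        else st.1), v))
    (0, -1)
  st.1 + (PySem.List.pyGetD (PySem.List.pyGetD rule_body (-1) (0, [])).2 0 0 - st.2 - 1)

-- ===== PRECONDITION & SPEC =====
-- Pre_ excludes exactly the inputs where Python A raises IndexError: an empty rule_body
-- (rule_body[-1]) or an element whose literal list is empty (rule_body[i][1][0]).
def Pre_get_real_pos_idx (rule_body : List (Int × List Int)) (num_vars : Int) : Prop :=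
  rule_body ≠ [] ∧ ∀ p ∈ rule_body, p.2 ≠ []
instance (rule_body : List (Int × List Int)) (num_vars : Int) : Decidable (Pre_get_real_pos_idx rule_body num_vars) := by unfold Pre_get_real_pos_idx; infer_instance

def pvWitness_get_real_pos_idx : (List (Int × List Int)) × Int := ([(1, [0]), (1, [2])], 3)

def Spec_get_real_pos_idx (rule_body : List (Int × List Int)) (num_vars : Int) (out : Int) : Prop := out = get_real_pos_idx_alt rule_body num_vars
instance (rule_body : List (Int × List Int)) (num_vars : Int) (out : Int) : Decidable (Spec_get_real_pos_idx rule_body num_vars out) := by unfold Spec_get_real_pos_idx; infer_instance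

-- ===== CLAIM (what is proved, stated in full; the proofs are below) =====
def Claim_equal_get_real_pos_idx : Prop := ∀ (rule_body : List (Int × List Int)) (num_vars : Int), Dom_get_real_pos_idx rule_body num_vars → Pre_get_real_pos_idx rule_body num_vars → Spec_get_real_pos_idx rule_body num_vars (get_real_pos_idx rule_body num_vars)

-- ===== LEMMAS AND PROOFS =====

-- proof-side mathematical binomial: C(m, k) for an Int m, 0 when m < 0
def mycomb (m : Int) (k : Nat) : Int := if m < 0 then 0 else (m.toNat.choose k : Int)

lemma mycomb_pascal (m : Int) (k : Nat) :
    mycomb (m + 1) (k + 1) = mycomb m k + mycomb m (k + 1) := by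
  unfold mycomb
  rcases lt_trichotomy m (-1) with h | h | h
  · rw [if_pos (by omega), if_pos (by omega), if_pos (by omega)]; ring
  · subst h; norm_num
  · rw [if_neg (by omega), if_neg (by omega), if_neg (by omega)]
    have h1 : (m + 1).toNat = m.toNat + 1 := by omega
    rw [h1, Nat.choose_succ_succ]
    push_cast; ring

lemma mycomb_eq_zero (m : Int) (k : Nat) (h : m < (k : Int)) : mycomb m k = 0 := by
  unfold mycomb
  split_ifs with h0
  · rfl
  · rw [Nat.choose_eq_zero_of_lt (by omega)]; rfl

lemma mycomb_one (m : Int) (h : 0 ≤ m) : mycomb m 1 = m := by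
  unfold mycomb; rw [if_neg (by omega), Nat.choose_one_right]; omega

lemma pvComb_loop (n : Int) (hn : 0 ≤ n) (m : Nat) (hm : m ≤ n.toNat) :
    (PySem.List.pyRange 0 (m : Int) 1).foldl
        (fun r t => PySem.Int.floordiv (r * (n - t)) (t + 1)) 1 = (n.toNat.choose m : Int) := by
  induction m with
  | zero => simp
  | succ m ih =>
    have hsp : PySem.List.pyRange 0 ((m : Int) + 1) 1
        = PySem.List.pyRange 0 (m : Int) 1 ++ [(m : Int)] :=
      PySem.List.pyRange_one_succ_right (by positivity)
    push_cast
    rw [hsp, List.foldl_append, ih (by omega)]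
    simp only [List.foldl]
    have h1 : n - (m : Int) = ((n.toNat - m : Nat) : Int) := by omega
    have h2 : (m : Int) + 1 = ((m + 1 : Nat) : Int) := by push_cast; ring
    rw [h1, h2, ← Nat.cast_mul, PySem.Int.floordiv_natCast]
    congr 1
    rw [← Nat.choose_succ_right_eq, Nat.mul_div_cancel _ (by omega)]

lemma pvComb_eq (n : Int) (k : Nat) : pvComb n (k : Int) = mycomb n k := by
  unfold pvComb mycomb
  rcases lt_or_ge n 0 with hn | hn
  · rw [if_pos (by left; exact hn), if_pos hn]
  · rcases le_or_gt (k : Int) n with hk | hk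
    · rw [if_neg (by omega), if_neg (by omega)]
      exact pvComb_loop n hn k (by omega)
    · rw [if_pos (Or.inr (Or.inr hk)), if_neg (by omega),
        Nat.choose_eq_zero_of_lt (by omega), Nat.cast_zero]

lemma tele (r : Nat) (n : Int) : ∀ (c : Nat) (a : Int),
    ((PySem.List.pyRange a (a + c) 1).map (fun j => mycomb (n - 1 - j) r)).sum
      = mycomb (n - a) (r + 1) - mycomb (n - a - c) (r + 1) := by
  intro c
  induction c with
  | zero =>
    intro a
    rw [show a + ((0 : Nat) : Int) = a by push_cast; ring, PySem.List.pyRange_one_eq_nil le_rfl]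
    simp
  | succ c ih =>
    intro a
    have hsp : PySem.List.pyRange a (a + (((c : Nat) + 1 : Nat) : Int)) 1
        = PySem.List.pyRange a (a + c) 1 ++ [a + c] := by
      rw [show a + (((c : Nat) + 1 : Nat) : Int) = (a + c) + 1 by push_cast; ring]
      exact PySem.List.pyRange_one_succ_right (by omega)
    rw [hsp, List.map_append, List.sum_append, ih a]
    simp only [List.map, List.sum_cons, List.sum_nil, add_zero]
    have hp := mycomb_pascal (n - a - c - 1) r
    have h1 : n - a - c - 1 + 1 = n - a - c := by ring
    have h2 : n - 1 - (a + c) = n - a - c - 1 := by ring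
    rw [h1] at hp
    rw [h2]
    rw [show n - a - ((c + 1 : Nat) : Int) = n - a - c - 1 by push_cast; ring]
    omega

lemma arith (n : Int) : ∀ (c : Nat) (a : Int),
    2 * ((PySem.List.pyRange a (a + c) 1).map (fun j => n - 1 - j)).sum
      = c * ((n - 1 - a) + (n - a - c)) := by
  intro c
  induction c with
  | zero =>
    intro a
    rw [show a + ((0 : Nat) : Int) = a by push_cast; ring, PySem.List.pyRange_one_eq_nil le_rfl]
    simp
  | succ c ih =>
    intro a
    have hsp : PySem.List.pyRange a (a + (((c : Nat) + 1 : Nat) : Int)) 1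
        = PySem.List.pyRange a (a + c) 1 ++ [a + c] := by
      rw [show a + (((c : Nat) + 1 : Nat) : Int) = (a + c) + 1 by push_cast; ring]
      exact PySem.List.pyRange_one_succ_right (by omega)
    rw [hsp, List.map_append, List.sum_append]
    simp only [List.map, List.sum_cons, List.sum_nil, add_zero]
    have hi := ih a
    push_cast
    linear_combination hi

lemma inner_eq (k : Nat) : ∀ (n L i last : Int), i = L - 1 - k → 1 ≤ i → i - 1 ≤ last →
    get_pos_idx (n - (L - i)) n i L last
      = if k = 0 then n - 1 - last else mycomb (n - 1 - last) (k + 1) := by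
  induction k with
  | zero =>
    intro n L i last hik hi hl
    rw [get_pos_idx.eq_def, if_neg (by omega), if_neg (by omega), if_pos (by omega), if_pos rfl]
    omega
  | succ k ih =>
    intro n L i last hik hi hl
    rw [get_pos_idx.eq_def, if_neg (by omega), if_neg (by omega), if_neg (by omega),
      max_eq_left (by omega), PySem.List.foldl_add, zero_add]
    have hmap : ∀ j ∈ PySem.List.pyRange (last + 1) (n - (L - i) + 1) 1,
        get_pos_idx (n - (L - 1 - i)) n (i + 1) L j = mycomb (n - 1 - j) (k + 1) := by
      intro j hj
      rw [PySem.List.mem_pyRange_one] at hj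
      have heq : n - (L - 1 - i) = n - (L - (i + 1)) := by ring
      rw [heq, ih n L (i + 1) j (by omega) (by omega) (by omega)]
      cases k with
      | zero => rw [if_pos rfl, mycomb_one _ (by omega)]
      | succ k' => rw [if_neg (by omega)]
    rw [List.map_congr_left hmap, if_neg (by omega)]
    by_cases hne : last + 1 ≤ n - (L - i) + 1
    · rw [show n - (L - i) + 1 = (last + 1) + ((n - (L - i) + 1 - (last + 1)).toNat : Int) by omega,
        tele]
      rw [mycomb_eq_zero (n - (last + 1) - ((n - (L - i) + 1 - (last + 1)).toNat : Int))
        (k + 1 + 1) (by omega)]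
      rw [show n - (last + 1) = n - 1 - last by ring]
      ring
    · rw [PySem.List.pyRange_one_eq_nil (by omega)]
      rw [mycomb_eq_zero (n - 1 - last) (k + 1 + 1) (by omega)]
      rfl

lemma contrib (n L i last v : Int) (hi0 : 0 ≤ i) (hiL : i ≤ L - 2) (hv : v > i) (hvl : v > last + 1) :
    get_pos_idx (v - 1) n i L last =
      (if L - 1 - i = 1 then
        PySem.Int.floordiv ((v - max (last + 1) i) * ((n - 1 - max (last + 1) i) + (n - v))) 2
      else
        pvComb (n - max (last + 1) i) (L - 1 - i + 1) - pvComb (n - v) (L - 1 - i + 1)) := by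
  rw [get_pos_idx.eq_def, if_neg (by omega), if_neg (by omega), if_neg (by omega),
    PySem.List.foldl_add, zero_add]
  set lb := max (last + 1) i with hlb
  have hlbv : lb ≤ v - 1 := by omega
  have hct : ((v - lb).toNat : Int) = v - lb := by omega
  set k := (L - 2 - i).toNat with hk
  have hmap : ∀ j ∈ PySem.List.pyRange lb (v - 1 + 1) 1,
      get_pos_idx (n - (L - 1 - i)) n (i + 1) L j
        = (if k = 0 then n - 1 - j else mycomb (n - 1 - j) (k + 1)) := by
    intro j hj
    rw [PySem.List.mem_pyRange_one] at hj
    have heq : n - (L - 1 - i) = n - (L - (i + 1)) := by ring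
    rw [heq, inner_eq k n L (i + 1) j (by omega) (by omega) (by omega)]
  by_cases h1 : L - 1 - i = 1
  · have hk0 : k = 0 := by omega
    rw [if_pos h1]
    have hmap0 : ∀ j ∈ PySem.List.pyRange lb (v - 1 + 1) 1,
        get_pos_idx (n - (L - 1 - i)) n (i + 1) L j = n - 1 - j := by
      intro j hj; rw [hmap j hj, if_pos hk0]
    rw [List.map_congr_left hmap0]
    have ha := arith n (v - lb).toNat lb
    rw [hct, show lb + (v - lb) = v - 1 + 1 by ring] at ha
    rw [show (v - lb) * ((n - 1 - lb) + (n - v))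
        = 2 * ((PySem.List.pyRange lb (v - 1 + 1) 1).map (fun j => n - 1 - j)).sum from by
      linear_combination -ha]
    rw [PySem.Int.floordiv_eq_ediv_of_pos (by norm_num), Int.mul_ediv_cancel_left _ (by norm_num)]
  · rw [if_neg h1]
    have hmap1 : ∀ j ∈ PySem.List.pyRange lb (v - 1 + 1) 1,
        get_pos_idx (n - (L - 1 - i)) n (i + 1) L j = mycomb (n - 1 - j) (k + 1) := by
      intro j hj; rw [hmap j hj, if_neg (by omega)]
    rw [List.map_congr_left hmap1,
      show v - 1 + 1 = lb + ((v - lb).toNat : Int) by omega, tele]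
    rw [show n - lb - ((v - lb).toNat : Int) = n - v by omega]
    rw [show L - 1 - i + 1 = ((k + 2 : Nat) : Int) by push_cast; omega,
      pvComb_eq (n - lb) (k + 2), pvComb_eq (n - v) (k + 2)]

-- ===== VERDICT (by name: the statement is the Claim_ definition above) =====
theorem get_real_pos_idx_spec : Claim_equal_get_real_pos_idx := by
  intro rule_body num_vars _ _
  unfold Spec_get_real_pos_idx get_real_pos_idx get_real_pos_idx_alt
  have h := PySem.List.foldl_congr_mem
    (l := PySem.List.pyRange 0 ((rule_body.length : Int) - 1) 1)
    (init := ((0 : Int), (-1 : Int)))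
    (f := fun (st : Int × Int) i =>
      let v := PySem.List.pyGetD (PySem.List.pyGetD rule_body i (0, [])).2 0 0
      ((if v > i ∧ v > st.2 + 1 then
          st.1 + get_pos_idx (v - 1) num_vars i (rule_body.length : Int) st.2
        else st.1), v))
    (g := fun (st : Int × Int) i =>
      let v := PySem.List.pyGetD (PySem.List.pyGetD rule_body i (0, [])).2 0 0
      ((if v > i ∧ v > st.2 + 1 then
          let lb := max (st.2 + 1) i
          let r := (rule_body.length : Int) - 1 - i
          if r = 1 then
            st.1 + PySem.Int.floordiv ((v - lb) * ((num_vars - 1 - lb) + (num_vars - v))) 2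
          else
            st.1 + (pvComb (num_vars - lb) (r + 1) - pvComb (num_vars - v) (r + 1))
        else st.1), v))
    ?_
  · simp only [h]
  · intro acc x hx
    rw [PySem.List.mem_pyRange_one] at hx
    simp only
    split_ifs with hg hr
    · rw [contrib num_vars (rule_body.length : Int) x acc.2 _ hx.1 (by omega) hg.1 hg.2, if_pos hr]
    · rw [contrib num_vars (rule_body.length : Int) x acc.2 _ hx.1 (by omega) hg.1 hg.2, if_neg hr]
    · rfl
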